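-- pv_equiv track=rewrite | github.com/bioinfocoding/Analysis_of_SDS-PAGE | functions.py | filter_common_ranges_keep_original
-- ===== SOURCE A (Python) =====
-- def filter_common_ranges_keep_original(contour_ranges_all, tolerance=20):
--     lanes = list(contour_ranges_all.keys())
--     if not lanes:
--         return {}
--
--     reference_ranges = contour_ranges_all[lanes[0]]
--     common_ranges = []
--     for ref_range in reference_ranges:
--         is_common = all(
--             any(is_within_tolerance(ref_range, lane_range, tolerance) for lane_range in contour_ranges_all[lane])
--             for lane in lanes[1:]
--         )
--         if is_common:
--             common_ranges.append(ref_range)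
--
--     filtered_ranges = {lane: [] for lane in lanes}
--     for lane in lanes:
--         for original_range in contour_ranges_all[lane]:
--             if any(is_within_tolerance(original_range, common_range, tolerance) for common_range in common_ranges):
--                 filtered_ranges[lane].append(original_range)
--
--     return filtered_ranges
--
-- def is_within_tolerance(range1, range2, tolerance):
--     return (
--         abs(range1[0] - range2[0]) <= tolerance and
--         abs(range1[1] - range2[1]) <= tolerance
--     )
-- ===== SOURCE B (Python) =====
-- # Spatial-hash grid with cell size max(tolerance,1): each "any range within
-- # tolerance" test becomes a lookup in the 9 neighboring grid cells.
-- def filter_common_ranges_keep_original(contour_ranges_all, tolerance=20):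
--     items = list(contour_ranges_all.items())
--     if not items:
--         return {}
--     c = max(tolerance, 1)
--
--     def build_grid(ranges):
--         grid = {}
--         for q in ranges:
--             grid.setdefault((q[0] // c, q[1] // c), []).append(q)
--         return grid
--
--     def near(grid, r):
--         cx, cy = r[0] // c, r[1] // c
--         return any(is_within_tolerance(r, q, tolerance)
--                    for dx in (-1, 0, 1) for dy in (-1, 0, 1)
--                    for q in grid.get((cx + dx, cy + dy), ()))
--
--     other_grids = [build_grid(ranges) for _, ranges in items[1:]]
--     common = [r for r in items[0][1] if all(near(g, r) for g in other_grids)]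
--     common_grid = build_grid(common)
--     return {lane: [r for r in ranges if near(common_grid, r)]
--             for lane, ranges in items}
--
-- def is_within_tolerance(range1, range2, tolerance):
--     return (
--         abs(range1[0] - range2[0]) <= tolerance and
--         abs(range1[1] - range2[1]) <= tolerance
--     )
-- ===== Notes on version B (the rewrite author's own statement) =====
-- stated objective: alternative
-- what changed: Replaces every inner linear any-scan over a lane's ranges with a spatial-hash grid (dict keyed by (x//c, y//c) with cell size c = max(tolerance,1)) so each tolerance test only inspects the 9 neighboring cells; grids are built once per lane and once for the common set; it trades a per-range hashing overhead for avoiding pairwise scans on dense lanes.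
import Mathlib
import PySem

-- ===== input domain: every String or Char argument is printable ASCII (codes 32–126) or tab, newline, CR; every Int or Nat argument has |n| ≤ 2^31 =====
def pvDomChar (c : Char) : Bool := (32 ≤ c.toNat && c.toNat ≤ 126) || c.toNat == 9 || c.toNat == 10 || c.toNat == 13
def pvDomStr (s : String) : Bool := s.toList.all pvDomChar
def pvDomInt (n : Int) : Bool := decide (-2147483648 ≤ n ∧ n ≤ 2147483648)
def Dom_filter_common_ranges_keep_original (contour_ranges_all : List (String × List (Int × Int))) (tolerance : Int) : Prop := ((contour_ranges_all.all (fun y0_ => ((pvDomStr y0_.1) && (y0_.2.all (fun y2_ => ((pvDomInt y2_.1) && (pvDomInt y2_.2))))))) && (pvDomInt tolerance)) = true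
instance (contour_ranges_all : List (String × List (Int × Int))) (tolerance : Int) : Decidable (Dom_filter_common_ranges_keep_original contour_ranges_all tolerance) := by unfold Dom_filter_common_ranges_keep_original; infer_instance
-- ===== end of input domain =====

-- B replaces A's inner linear any-scans by a spatial-hash grid with cell size max(tolerance,1):
-- candidates are looked up in the 9 neighboring cells (alternative algorithm, same result).


-- ===== PORT A =====
def is_within_tolerance (range1 range2 : Int × Int) (tolerance : Int) : Bool :=
  decide (|range1.1 - range2.1| ≤ tolerance) && decide (|range1.2 - range2.2| ≤ tolerance)

-- literal port of A; the dict argument is the association list, wrapped as PySem.Dict.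
-- Python's d[lane] is ported as getD … [] : every looked-up lane comes from d.keys, so the
-- lookup always succeeds and the default is never used (exact).
def filter_common_ranges_keep_original (contour_ranges_all : List (String × List (Int × Int))) (tolerance : Int) : List (String × List (Int × Int)) :=
  let d : PySem.Dict String (List (Int × Int)) := PySem.Dict.mk contour_ranges_all
  let lanes := PySem.Dict.keys d
  match lanes with
  | [] => []
  | lane0 :: restLanes =>
    let reference_ranges := PySem.Dict.getD d lane0 []
    let common_ranges := reference_ranges.foldl (fun acc ref_range =>
      if restLanes.all (fun lane =>
           (PySem.Dict.getD d lane []).any (fun lane_range => is_within_tolerance ref_range lane_range tolerance))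
      then acc ++ [ref_range] else acc) []
    let filtered0 : PySem.Dict String (List (Int × Int)) :=
      (lane0 :: restLanes).foldl (fun fd lane => PySem.Dict.insert fd lane []) PySem.Dict.empty
    let filtered := (lane0 :: restLanes).foldl (fun fd lane =>
      (PySem.Dict.getD d lane []).foldl (fun fd original_range =>
        if common_ranges.any (fun common_range => is_within_tolerance original_range common_range tolerance)
        then PySem.Dict.modify fd lane [] (fun xs => xs ++ [original_range]) else fd) fd) filtered0
    filtered.items

-- ===== PORT B =====
-- grid.setdefault(cell, []).append(q) is ported with Dict.modify (d[k] = f(d.get(k, dflt))), exact.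
def pv_build_grid (ranges : List (Int × Int)) (c : Int) : PySem.Dict (Int × Int) (List (Int × Int)) :=
  ranges.foldl (fun g q =>
    PySem.Dict.modify g (PySem.Int.floordiv q.1 c, PySem.Int.floordiv q.2 c) [] (fun xs => xs ++ [q]))
    PySem.Dict.empty

def pv_near (g : PySem.Dict (Int × Int) (List (Int × Int))) (r : Int × Int) (tolerance c : Int) : Bool :=
  let cx := PySem.Int.floordiv r.1 c
  let cy := PySem.Int.floordiv r.2 c
  ([-1, 0, 1] : List Int).any (fun dx =>
    ([-1, 0, 1] : List Int).any (fun dy =>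
      (PySem.Dict.getD g (cx + dx, cy + dy) []).any (fun q => is_within_tolerance r q tolerance)))

def filter_common_ranges_keep_original_alt (contour_ranges_all : List (String × List (Int × Int))) (tolerance : Int) : List (String × List (Int × Int)) :=
  match contour_ranges_all with
  | [] => []
  | item0 :: rest =>
    let c := max tolerance 1
    let other_grids := rest.map (fun it => pv_build_grid it.2 c)
    let common := item0.2.filter (fun r => other_grids.all (fun g => pv_near g r tolerance c))
    let common_grid := pv_build_grid common c
    (item0 :: rest).map (fun it => (it.1, it.2.filter (fun r => pv_near common_grid r tolerance c)))

-- ===== PRECONDITION & SPEC =====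
-- Pre_ excludes association lists with duplicate lane names: A's argument is a Python dict,
-- whose keys are necessarily distinct, so such lists do not denote any input A is run on.
def Pre_filter_common_ranges_keep_original (contour_ranges_all : List (String × List (Int × Int))) (tolerance : Int) : Prop :=
  (contour_ranges_all.map Prod.fst).Nodup
instance (contour_ranges_all : List (String × List (Int × Int))) (tolerance : Int) : Decidable (Pre_filter_common_ranges_keep_original contour_ranges_all tolerance) := by unfold Pre_filter_common_ranges_keep_original; infer_instance

def pvWitness_filter_common_ranges_keep_original : (List (String × List (Int × Int))) × Int :=
  ([("lane1", [(10, 50), (200, 300)]), ("lane2", [(15, 55)])], 20)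

def Spec_filter_common_ranges_keep_original (contour_ranges_all : List (String × List (Int × Int))) (tolerance : Int) (out : List (String × List (Int × Int))) : Prop := out = filter_common_ranges_keep_original_alt contour_ranges_all tolerance
instance (contour_ranges_all : List (String × List (Int × Int))) (tolerance : Int) (out : List (String × List (Int × Int))) : Decidable (Spec_filter_common_ranges_keep_original contour_ranges_all tolerance out) := by unfold Spec_filter_common_ranges_keep_original; infer_instance

-- ===== CLAIM (what is proved, stated in full; the proofs are below) =====
def Claim_equal_filter_common_ranges_keep_original : Prop := ∀ (contour_ranges_all : List (String × List (Int × Int))) (tolerance : Int), Dom_filter_common_ranges_keep_original contour_ranges_all tolerance → Pre_filter_common_ranges_keep_original contour_ranges_all tolerance → Spec_filter_common_ranges_keep_original contour_ranges_all tolerance (filter_common_ranges_keep_original contour_ranges_all tolerance)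

-- ===== LEMMAS AND PROOFS =====

-- ===== grid lemmas (B side) =====

-- two coordinates within c land in the same or an adjacent grid cell
theorem cell_bound (x y c : Int) (hc : 0 < c) (h : |x - y| ≤ c) :
    PySem.Int.floordiv x c - 1 ≤ PySem.Int.floordiv y c ∧
    PySem.Int.floordiv y c ≤ PySem.Int.floordiv x c + 1 := by
  simp only [PySem.Int.floordiv_eq_ediv_of_pos hc]
  obtain ⟨h1, h2⟩ := abs_le.mp h
  have hy1 : x - c ≤ y := by omega
  have hy2 : y ≤ x + c := by omega
  have e1 : (x - c) / c = x / c - 1 := by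
    have h := Int.add_mul_ediv_right x (-1) (ne_of_gt hc)
    rw [show x - c = x + (-1) * c by ring]; omega
  have e2 : (x + c) / c = x / c + 1 := by
    have h := Int.add_mul_ediv_right x 1 (ne_of_gt hc)
    rw [show x + c = x + 1 * c by ring]; omega
  exact ⟨by rw [← e1]; exact Int.ediv_le_ediv hc hy1,
         by rw [← e2]; exact Int.ediv_le_ediv hc hy2⟩

-- the bucket of a grid is the sublist of ranges falling in that cell
theorem bucket_aux (c : Int) (k : Int × Int) (ranges : List (Int × Int)) :
    ((ranges.map (fun q => ((PySem.Int.floordiv q.1 c, PySem.Int.floordiv q.2 c), q))).filter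
        (fun p => p.1 == k)).map (fun p => p.2)
      = ranges.filter (fun q => (PySem.Int.floordiv q.1 c, PySem.Int.floordiv q.2 c) == k) := by
  induction ranges with
  | nil => rfl
  | cons q l ih =>
    simp only [List.map_cons, List.filter_cons]
    by_cases h : ((PySem.Int.floordiv q.1 c, PySem.Int.floordiv q.2 c) == k) = true <;>
      simp [h, ih]

theorem grid_bucket (ranges : List (Int × Int)) (c : Int) (k : Int × Int) :
    PySem.Dict.getD (pv_build_grid ranges c) k []
      = ranges.filter (fun q => (PySem.Int.floordiv q.1 c, PySem.Int.floordiv q.2 c) == k) := by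
  have hb : pv_build_grid ranges c
      = (ranges.map (fun q => ((PySem.Int.floordiv q.1 c, PySem.Int.floordiv q.2 c), q))).foldl
          (fun d p => PySem.Dict.modify d p.1 [] (fun xs => xs ++ [p.2])) PySem.Dict.empty := by
    rw [List.foldl_map]; rfl
  rw [hb, PySem.Dict.getD_foldl_modify_append, PySem.Dict.getD_empty, List.nil_append, bucket_aux]

-- the 3×3 neighbor lookup in the grid equals the linear scan
theorem grid_any (ranges : List (Int × Int)) (r : Int × Int) (tol : Int) :
    pv_near (pv_build_grid ranges (max tol 1)) r tol (max tol 1)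
      = ranges.any (fun q => is_within_tolerance r q tol) := by
  have hc : (0 : Int) < max tol 1 := lt_of_lt_of_le Int.zero_lt_one (le_max_right _ _)
  simp only [pv_near, grid_bucket, List.any_filter]
  rw [Bool.eq_iff_iff]
  simp only [List.any_eq_true, Bool.and_eq_true, beq_iff_eq, Prod.mk.injEq]
  constructor
  · rintro ⟨dx, _, dy, _, q, hq, _, hw⟩
    exact ⟨q, hq, hw⟩
  · rintro ⟨q, hq, hw⟩
    have hw' := hw
    simp only [is_within_tolerance, Bool.and_eq_true, decide_eq_true_eq] at hw'
    obtain ⟨b11, b12⟩ := cell_bound r.1 q.1 (max tol 1) hc (le_trans hw'.1 (le_max_left _ _))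
    obtain ⟨b21, b22⟩ := cell_bound r.2 q.2 (max tol 1) hc (le_trans hw'.2 (le_max_left _ _))
    refine ⟨PySem.Int.floordiv q.1 (max tol 1) - PySem.Int.floordiv r.1 (max tol 1), ?_,
      PySem.Int.floordiv q.2 (max tol 1) - PySem.Int.floordiv r.2 (max tol 1), ?_,
      q, hq, ⟨by omega, by omega⟩, hw⟩
    · simp only [List.mem_cons, List.not_mem_nil, or_false]; omega
    · simp only [List.mem_cons, List.not_mem_nil, or_false]; omega

-- ===== A-side dict machinery =====

theorem all_congr_mem {α : Type} (l : List α) (f g : α → Bool)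
    (h : ∀ x ∈ l, f x = g x) : l.all f = l.all g := by
  induction l with
  | nil => rfl
  | cons x l ih =>
    simp only [List.all_cons, h x (by simp), ih (fun y hy => h y (by simp [hy]))]

theorem map_noop (lane : String) (w : String × List (Int × Int)) (l : List (String × List (Int × Int)))
    (h : ∀ p ∈ l, p.1 ≠ lane) :
    l.map (fun p => if p.1 == lane then w else p) = l := by
  have := List.map_congr_left (l := l) (f := fun p => if p.1 == lane then w else p) (g := id)
    (by intro p hp; simp [h p hp])
  simpa using this

-- Dict.modify at a key occurring exactly once rewrites that entry in place.
theorem modify_mid (lane : String) (v : List (Int × Int)) (f : List (Int × Int) → List (Int × Int))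
    (pre suf : List (String × List (Int × Int)))
    (hpre : ∀ p ∈ pre, p.1 ≠ lane) (hsuf : ∀ p ∈ suf, p.1 ≠ lane) :
    PySem.Dict.modify (PySem.Dict.mk (pre ++ (lane, v) :: suf)) lane [] f
      = PySem.Dict.mk (pre ++ (lane, f v) :: suf) := by
  have hfind : List.find? (fun p => p.1 == lane) (pre ++ (lane, v) :: suf) = some (lane, v) := by
    rw [List.find?_append]
    have : List.find? (fun p => p.1 == lane) pre = none := by
      rw [List.find?_eq_none]; intro p hp; simpa using hpre p hp
    simp [this]
  have hcont : (PySem.Dict.mk (pre ++ (lane, v) :: suf)).contains lane = true := by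
    simp [PySem.Dict.contains]
  simp only [PySem.Dict.modify, PySem.Dict.getD, PySem.Dict.get?, PySem.Dict.insert, hcont, if_pos, hfind]
  simp only [Option.map_some, Option.getD_some]
  congr 1
  rw [List.map_append, map_noop lane _ pre hpre, List.map_cons, map_noop lane _ suf hsuf]
  simp

-- the inner append loop of A's second phase, at the items level
theorem inner_items (tolerance : Int) (common : List (Int × Int)) (lane : String) :
    ∀ (ranges : List (Int × Int)) (pre suf : List (String × List (Int × Int))) (v : List (Int × Int)),
      (∀ p ∈ pre, p.1 ≠ lane) → (∀ p ∈ suf, p.1 ≠ lane) →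
      (ranges.foldl (fun fd original_range =>
          if common.any (fun c => is_within_tolerance original_range c tolerance)
          then PySem.Dict.modify fd lane [] (fun xs => xs ++ [original_range]) else fd)
        (PySem.Dict.mk (pre ++ (lane, v) :: suf)))
      = PySem.Dict.mk (pre ++ (lane, v ++ ranges.filter (fun r => common.any (fun c => is_within_tolerance r c tolerance))) :: suf) := by
  intro ranges
  induction ranges with
  | nil => intro pre suf v hpre hsuf; simp
  | cons r ranges ih =>
    intro pre suf v hpre hsuf
    simp only [List.foldl_cons]
    by_cases hc : common.any (fun c => is_within_tolerance r c tolerance) = true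
    · rw [if_pos hc, modify_mid lane v _ pre suf hpre hsuf, ih pre suf (v ++ [r]) hpre hsuf]
      simp [hc]
    · rw [if_neg hc, ih pre suf v hpre hsuf]
      simp [hc]

-- the outer loop of A's second phase
theorem outer_items (tolerance : Int) (common : List (Int × Int)) :
    ∀ (l pre : List (String × List (Int × Int))),
      (∀ p ∈ pre, ∀ it ∈ l, p.1 ≠ it.1) → (l.map Prod.fst).Nodup →
      (l.foldl (fun fd (it : String × List (Int × Int)) =>
          it.2.foldl (fun fd original_range =>
            if common.any (fun c => is_within_tolerance original_range c tolerance)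
            then PySem.Dict.modify fd it.1 [] (fun xs => xs ++ [original_range]) else fd) fd)
        (PySem.Dict.mk (pre ++ l.map (fun it => (it.1, ([] : List (Int × Int))))))).items
      = pre ++ l.map (fun it => (it.1, it.2.filter (fun r => common.any (fun c => is_within_tolerance r c tolerance)))) := by
  intro l
  induction l with
  | nil => intro pre _ _; simp
  | cons it0 l ih =>
    intro pre hdisj hnd
    simp only [List.map_cons, List.foldl_cons]
    simp only [List.map_cons, List.nodup_cons] at hnd
    have hsuf : ∀ p ∈ l.map (fun it => (it.1, ([] : List (Int × Int)))), p.1 ≠ it0.1 := by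
      intro p hp
      obtain ⟨it, hit, rfl⟩ := List.mem_map.mp hp
      intro h; exact hnd.1 (List.mem_map.mpr ⟨it, hit, h⟩)
    have hpre : ∀ p ∈ pre, p.1 ≠ it0.1 := fun p hp => hdisj p hp it0 (by simp)
    rw [inner_items tolerance common it0.1 it0.2 pre _ [] hpre hsuf]
    simp only [List.nil_append]
    have := ih (pre ++ [(it0.1, it0.2.filter (fun r => common.any (fun c => is_within_tolerance r c tolerance)))])
      (by
        intro p hp it hit
        rcases List.mem_append.mp hp with h | h
        · exact hdisj p h it (by simp [hit])
        · simp only [List.mem_singleton] at h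
          subst h
          intro he; exact hnd.1 (List.mem_map.mpr ⟨it, hit, he.symm⟩))
      hnd.2
    simpa using this

-- ===== VERDICT (by name: the statement is the Claim_ definition above) =====
theorem filter_common_ranges_keep_original_spec : Claim_equal_filter_common_ranges_keep_original := by
  intro P tolerance _ hnd
  unfold Spec_filter_common_ranges_keep_original
  unfold Pre_filter_common_ranges_keep_original at hnd
  match P with
  | [] => rfl
  | item0 :: rest =>
    have hkeysnd : (PySem.Dict.mk (item0 :: rest)).keys.Nodup := hnd
    have hgetD : ∀ it ∈ item0 :: rest, PySem.Dict.getD (PySem.Dict.mk (item0 :: rest)) it.1 [] = it.2 := by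
      intro it hit
      exact PySem.Dict.getD_of_mem_items _ (by simpa using hit) hkeysnd []
    -- B reduced to the plain (grid-free) form, via grid_any
    have hB : filter_common_ranges_keep_original_alt (item0 :: rest) tolerance
        = (item0 :: rest).map (fun it => (it.1, it.2.filter (fun r =>
            (item0.2.filter (fun r' => rest.all (fun it' => it'.2.any
              (fun q => is_within_tolerance r' q tolerance)))).any
              (fun c => is_within_tolerance r c tolerance)))) := by
      simp only [filter_common_ranges_keep_original_alt, List.all_map, Function.comp_def, grid_any]
    rw [hB]
    simp only [filter_common_ranges_keep_original,
      PySem.Dict.keys, List.map_cons]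
    rw [hgetD item0 (by simp)]
    -- A's common append loop = the plain filter
    have hcommon :
        (item0.2.foldl (fun acc ref_range =>
          if (rest.map (fun x => x.1)).all (fun lane =>
               (PySem.Dict.getD (PySem.Dict.mk (item0 :: rest)) lane []).any
                 (fun lane_range => is_within_tolerance ref_range lane_range tolerance))
          then acc ++ [ref_range] else acc) [])
        = item0.2.filter (fun r' => rest.all (fun it' => it'.2.any
            (fun q => is_within_tolerance r' q tolerance))) := by
      rw [PySem.List.foldl_append_if _ (fun x => x)]
      simp only [List.nil_append, List.map_id_fun', id]
      refine List.filter_congr ?_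
      intro x _
      rw [List.all_map]
      refine all_congr_mem rest _ _ (fun it hit => ?_)
      simp only [Function.comp]
      rw [hgetD it (by simp [hit])]
    rw [hcommon]
    -- seed dict: every lane mapped to []
    have h0 : ((item0 :: rest).map (fun x => x.1)).foldl
          (fun fd lane => PySem.Dict.insert fd lane ([] : List (Int × Int))) PySem.Dict.empty
        = PySem.Dict.mk ((item0 :: rest).map (fun it => (it.1, ([] : List (Int × Int))))) := by
      apply PySem.Dict.ext
      rw [PySem.Dict.items_foldl_insert_fresh _ (fun a => a) (fun _ => ([] : List (Int × Int))) _
        (fun a _ => PySem.Dict.contains_empty a) (by simpa using hnd)]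
      simp [PySem.Dict.empty, List.map_map, Function.comp]
    rw [show (item0.1 :: rest.map (fun x => x.1)) = (item0 :: rest).map (fun x => x.1) from rfl,
        h0, List.foldl_map]
    rw [PySem.List.foldl_congr_mem (item0 :: rest) _
      (fun fd (it : String × List (Int × Int)) =>
        it.2.foldl (fun fd original_range =>
          if (item0.2.filter (fun r' => rest.all (fun it' => it'.2.any
                (fun q => is_within_tolerance r' q tolerance)))).any
              (fun common_range => is_within_tolerance original_range common_range tolerance)
          then PySem.Dict.modify fd it.1 [] (fun xs => xs ++ [original_range]) else fd) fd) _
      (by intro acc x hx; rw [hgetD x hx])]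
    have := outer_items tolerance
      (item0.2.filter (fun r' => rest.all (fun it' => it'.2.any
        (fun q => is_within_tolerance r' q tolerance))))
      (item0 :: rest) [] (by simp) hnd
    simpa using this
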